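-- pv_equiv track=rewrite | github.com/njsaugat/leetcode-js | dailyPrac.py | all_ones
-- ===== SOURCE A (Python) =====
-- def all_ones(n):
--     dp=[0]*(n+1)
--     offset=1
--     for i in range(1,n+1):
--         if offset*i==2:
--             offset=i
--
--         dp[i]=1+dp[i-offset]
--
--     return dp
-- ===== SOURCE B (Python) =====
-- def all_ones(n):
--     return [(i + 1) // 2 for i in range(n + 1)]
-- ===== Notes on version B (the rewrite author's own statement) =====
-- stated objective: simpler
-- what changed: Replaces the DP recurrence with its mutating offset sentinel by a one-line closed form computing each element directly from its own index.
import Mathlib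
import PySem

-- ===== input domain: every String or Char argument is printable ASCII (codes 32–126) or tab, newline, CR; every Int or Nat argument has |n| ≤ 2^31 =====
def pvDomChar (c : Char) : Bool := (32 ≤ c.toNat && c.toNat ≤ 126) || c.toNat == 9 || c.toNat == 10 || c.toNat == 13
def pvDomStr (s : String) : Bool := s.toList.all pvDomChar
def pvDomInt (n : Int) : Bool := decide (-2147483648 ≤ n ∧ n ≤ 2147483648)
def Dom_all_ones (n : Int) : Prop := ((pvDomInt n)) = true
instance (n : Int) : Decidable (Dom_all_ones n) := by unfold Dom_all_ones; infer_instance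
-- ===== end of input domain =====

-- B replaces A's DP recurrence (with its mutating offset sentinel) by the per-index
-- closed form (i+1)//2; objective: simpler.

-- ===== PORT A =====
-- the body of A's for-loop: state = (dp, offset)
def allOnesStep (st : List Int × Int) (i : Int) : List Int × Int :=
  let offset := if st.2 * i = 2 then i else st.2
  (PySem.List.pySetD st.1 i (1 + PySem.List.pyGetD st.1 (i - offset) 0), offset)
  -- dp[i]/dp[i-offset] via pySetD/pyGetD: exact here, the indices are always in range

def all_ones (n : Int) : List Int :=
  ((PySem.List.pyRange 1 (n + 1) 1).foldl allOnesStep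
    (List.replicate (n + 1).toNat 0, 1)).1

-- ===== PORT B =====
def all_ones_alt (n : Int) : List Int :=
  (PySem.List.pyRange 0 (n + 1) 1).map (fun i => PySem.Int.floordiv (i + 1) 2)

-- ===== PRECONDITION & SPEC =====
def Spec_all_ones (n : Int) (out : List Int) : Prop := out = all_ones_alt n
instance (n : Int) (out : List Int) : Decidable (Spec_all_ones n out) := by unfold Spec_all_ones; infer_instance

-- ===== CLAIM (what is proved, stated in full; the proofs are below) =====
def Claim_equal_all_ones : Prop := ∀ (n : Int), Dom_all_ones n → Spec_all_ones n (all_ones n)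

-- ===== LEMMAS AND PROOFS =====

-- the closed-form value at index j
def gOnes (j : Nat) : Int := ((j + 1) / 2 : Nat)

lemma allOnes_loop_inv (N : Nat) (m : Nat) (hm : m ≤ N) :
    (PySem.List.pyRange 1 ((m : Int) + 1) 1).foldl allOnesStep
      (List.replicate (N + 1) 0, 1)
    = ((List.range (N + 1)).map (fun j => if j ≤ m then gOnes j else 0),
       if 2 ≤ m then 2 else 1) := by
  induction m with
  | zero =>
      rw [PySem.List.pyRange_one_eq_nil (by norm_num)]
      simp only [List.foldl_nil]
      congr 1
      apply List.ext_getElem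
      · simp
      · intro k h1 h2
        simp only [List.getElem_replicate, List.getElem_map, List.getElem_range, gOnes,
          Nat.le_zero]
        split
        · rename_i h; subst h; simp
        · rfl
  | succ m ih =>
      have hmN : m ≤ N := Nat.le_of_succ_le hm
      have hsplit : PySem.List.pyRange 1 (((m + 1 : Nat) : Int) + 1) 1
          = PySem.List.pyRange 1 ((m : Int) + 1) 1 ++ [(m : Int) + 1] := by
        have := PySem.List.pyRange_one_succ_right (a := 1) (b := (m : Int) + 1) (by omega)
        push_cast
        simpa using this
      rw [hsplit, List.foldl_append, ih hmN]
      simp only [List.foldl_cons, List.foldl_nil, allOnesStep]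
      have hset : ∀ (v : Int),
          PySem.List.pySetD ((List.range (N + 1)).map (fun j => if j ≤ m then gOnes j else 0))
              ((m : Int) + 1) v
          = ((List.range (N + 1)).map (fun j => if j ≤ m then gOnes j else 0)).set (m + 1) v := by
        intro v
        have : ((m : Int) + 1) = ((m + 1 : Nat) : Int) := by push_cast; ring
        rw [this, PySem.List.pySetD_natCast]
      have hget : ∀ (j : Nat), j ≤ m →
          PySem.List.pyGetD ((List.range (N + 1)).map (fun j => if j ≤ m then gOnes j else 0))
              (j : Int) 0 = gOnes j := by
        intro j hj
        rw [PySem.List.pyGetD_natCast]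
        have hjN : j < N + 1 := by omega
        rw [List.getD_eq_getElem _ _ (by simpa using hjN)]
        simp [hj]
      have htail : ((List.range (N + 1)).map (fun j => if j ≤ m then gOnes j else 0)).set (m + 1)
            (gOnes (m + 1))
          = (List.range (N + 1)).map (fun j => if j ≤ m + 1 then gOnes j else 0) := by
        apply List.ext_getElem
        · simp
        · intro k h1 h2
          have hk : k < N + 1 := by simpa using h2
          rw [List.getElem_set]
          by_cases hk1 : m + 1 = k
          · subst hk1; simp
          · simp only [if_neg hk1, List.getElem_map, List.getElem_range]
            by_cases hle : k ≤ m
            · simp [hle, Nat.le_succ_of_le hle]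
            · have hle2 : ¬ k ≤ m + 1 := by omega
              simp [hle, hle2]
      by_cases hm2 : 2 ≤ m
      · -- offset stays 2; dp[m+1] = 1 + dp[m-1]
        simp only [if_pos hm2]
        have hoff : ¬ ((2:Int) * ((m : Int) + 1) = 2) := by omega
        rw [if_neg hoff]
        have hidx : (m : Int) + 1 - 2 = ((m - 1 : Nat) : Int) := by omega
        rw [hidx, hget (m - 1) (by omega), hset]
        have hval : 1 + gOnes (m - 1) = gOnes (m + 1) := by
          simp only [gOnes]
          have h2 : (m - 1 + 1) / 2 + 1 = (m + 1 + 1) / 2 := by omega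
          push_cast [← h2]; ring
        rw [hval, htail]
        have h21 : 2 ≤ m + 1 := by omega
        simp [h21]
      · -- m = 0 or m = 1
        interval_cases m
        · -- m = 0 : offset stays 1, dp[1] = 1 + dp[0]
          have e1 : (if 2 ≤ 0 then (2:Int) else 1) = 1 := rfl
          rw [e1]
          have hco : ¬ ((1:Int) * (((0:ℕ):Int) + 1) = 2) := by norm_num
          rw [if_neg hco]
          have e2 : ((0:ℕ):Int) + 1 - 1 = ((0:ℕ):Int) := by norm_num
          rw [e2, hget 0 (le_refl 0), hset]
          have hval : 1 + gOnes 0 = gOnes (0 + 1) := by decide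
          rw [hval, htail]
          norm_num
        · -- m = 1 : offset becomes 2, dp[2] = 1 + dp[0]
          have e1 : (if 2 ≤ 1 then (2:Int) else 1) = 1 := rfl
          rw [e1]
          have hco : ((1:Int) * (((1:ℕ):Int) + 1) = 2) := by norm_num
          rw [if_pos hco]
          have e2 : ((1:ℕ):Int) + 1 - ((((1:ℕ):Int)) + 1) = ((0:ℕ):Int) := by norm_num
          rw [e2, hget 0 (by omega), hset]
          have hval : 1 + gOnes 0 = gOnes (1 + 1) := by decide
          rw [hval, htail]
          norm_num
-- ===== VERDICT (by name: the statement is the Claim_ definition above) =====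
theorem all_ones_spec : Claim_equal_all_ones := by
  intro n _
  unfold Spec_all_ones all_ones all_ones_alt
  by_cases h : n + 1 ≤ 0
  · rw [PySem.List.pyRange_one_eq_nil (by omega : n + 1 ≤ 1),
      PySem.List.pyRange_one_eq_nil (by omega : n + 1 ≤ 0)]
    simp [Int.toNat_of_nonpos h]
  · have hn : 0 ≤ n := by omega
    obtain ⟨N, rfl⟩ := Int.eq_ofNat_of_zero_le hn
    have h1 : ((N : Int) + 1).toNat = N + 1 := by omega
    rw [h1, allOnes_loop_inv N N le_rfl, PySem.List.pyRange_one]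
    have h2 : (((N : Int) + 1) - 0).toNat = N + 1 := by omega
    rw [h2]
    apply List.ext_getElem
    · simp
    · intro k hk1 hk2
      have hkN : k < N + 1 := by simpa using hk1
      simp only [List.getElem_map, List.getElem_range]
      rw [if_pos (by omega : k ≤ N)]
      have hfd : PySem.Int.floordiv (0 + (k : Int) + 1) 2 = (((k + 1) / 2 : ℕ) : Int) := by
        have hc := PySem.Int.floordiv_natCast (k + 1) 2
        push_cast at hc ⊢
        simp
      rw [hfd]
      rfl
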